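-- pv_equiv track=rewrite | github.com/wgfajardom/portfolio | Challenges/09_number_of_atoms/code_number_of_atoms.py | second_count
-- ===== SOURCE A (Python) =====
-- def second_count(l_parenthesis, r_parenthesis, n_parenthesis, ind_elements, nmb_elements):
--
--     # Taking into account the effect of parentheses and its associated numbers
--     for kk in range(len(r_parenthesis)):
--         l_par = l_parenthesis[kk]
--         r_par = r_parenthesis[kk]
--         multiple = n_parenthesis[kk]
--
--         # The number of atoms from elements within a parenthesis are multiplied by the corresponding number of the parenthesis
--         for ii in range(len(ind_elements)):
--             ind_elem = ind_elements[ii]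
--             if (ind_elem > l_par) and (ind_elem < r_par):
--                 nmb_elements[ii] = multiple*nmb_elements[ii]
--
--     return nmb_elements
-- ===== SOURCE B (Python) =====
-- # B: sort the elements once, turn each parenthesis into a contiguous range of sorted
-- # positions by binary search, compute every position's multiplier product with one
-- # divide-and-conquer pass (offline range-multiply / point-query), and map the factors
-- # back -- O((P+E) log (P+E)) instead of A's O(P*E) double loop.  Equivalence is about
-- # the RETURN value only: A mutates nmb_elements in place, B does not.
-- # (binary search is hand-written because this module imports nothing)
--
-- def _count_le(xs, v):
--     # number of entries <= v in the sorted list xs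
--     lo, hi = 0, len(xs)
--     while lo < hi:
--         mid = (lo + hi) // 2
--         if xs[mid] <= v:
--             lo = mid + 1
--         else:
--             hi = mid
--     return lo
--
-- def _count_lt(xs, v):
--     # number of entries < v in the sorted list xs
--     lo, hi = 0, len(xs)
--     while lo < hi:
--         mid = (lo + hi) // 2
--         if xs[mid] < v:
--             lo = mid + 1
--         else:
--             hi = mid
--     return lo
--
-- def _solve(a, b, ivs, acc):
--     # factors for sorted positions a..b-1; each iv = (lo, hi, m) multiplies [lo, hi)
--     full = acc
--     for lo, hi, m in ivs:
--         if lo <= a and b <= hi: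
--             full *= m
--     rest = [iv for iv in ivs if not (iv[0] <= a and b <= iv[1])]
--     if b - a == 1:
--         return [full]
--     mid = (a + b) // 2
--     left = _solve(a, mid, [iv for iv in rest if iv[0] < mid and a < iv[1]], full)
--     right = _solve(mid, b, [iv for iv in rest if iv[0] < b and mid < iv[1]], full)
--     return left + right
--
-- def second_count(l_parenthesis, r_parenthesis, n_parenthesis, ind_elements, nmb_elements):
--     m = len(ind_elements)
--     order = sorted(range(m), key=lambda i: ind_elements[i])
--     xs = [ind_elements[i] for i in order]
--     ivs = []
--     for k in range(len(r_parenthesis)):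
--         lo = _count_le(xs, l_parenthesis[k])
--         hi = _count_lt(xs, r_parenthesis[k])
--         if lo < hi:
--             ivs.append((lo, hi, n_parenthesis[k]))
--     fac_sorted = _solve(0, m, ivs, 1) if m > 0 else []
--     fac = [1] * m
--     for p in range(m):
--         fac[order[p]] = fac_sorted[p]
--     return [c * fac[i] for i, c in zip(range(m), nmb_elements)] + nmb_elements[m:]
-- ===== Notes on version B (the rewrite author's own statement) =====
-- stated objective: faster
-- what changed: Replaces A's O(P*E) double loop by sort + binary search + divide-and-conquer: elements are sorted once, each parenthesis becomes a contiguous range of sorted positions via two hand-written binary searches, all per-position multiplier products are computed in one segment-tree-style divide-and-conquer pass (offline range-multiply/point-query), and factors are mapped back through the sort permutation.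
import Mathlib
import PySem

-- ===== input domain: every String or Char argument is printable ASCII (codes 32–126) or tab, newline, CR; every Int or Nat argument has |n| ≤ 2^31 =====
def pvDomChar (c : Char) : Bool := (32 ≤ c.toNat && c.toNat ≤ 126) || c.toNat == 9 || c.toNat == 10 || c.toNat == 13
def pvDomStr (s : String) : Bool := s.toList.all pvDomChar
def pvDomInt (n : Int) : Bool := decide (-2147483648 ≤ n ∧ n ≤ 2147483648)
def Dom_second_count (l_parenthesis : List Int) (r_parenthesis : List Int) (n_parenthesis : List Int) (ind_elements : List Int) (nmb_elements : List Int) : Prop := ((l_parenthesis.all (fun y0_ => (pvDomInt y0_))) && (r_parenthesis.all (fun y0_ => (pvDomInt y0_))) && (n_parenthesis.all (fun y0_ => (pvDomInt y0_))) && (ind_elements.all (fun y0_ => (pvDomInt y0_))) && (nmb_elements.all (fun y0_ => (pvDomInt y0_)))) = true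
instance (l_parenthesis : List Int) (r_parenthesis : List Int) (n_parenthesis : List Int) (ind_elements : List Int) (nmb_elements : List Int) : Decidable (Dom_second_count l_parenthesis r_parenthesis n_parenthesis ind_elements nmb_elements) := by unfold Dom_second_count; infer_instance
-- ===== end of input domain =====

-- B replaces A's O(P*E) double loop by sort + binary search + one divide-and-conquer
-- range-multiply pass; equivalence is about the RETURN value only (A mutates
-- nmb_elements in place, B does not).

-- ===== PORT A =====
def second_count (l_parenthesis : List Int) (r_parenthesis : List Int) (n_parenthesis : List Int) (ind_elements : List Int) (nmb_elements : List Int) : List Int :=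
  (PySem.List.pyRange 0 (PySem.List.len r_parenthesis) 1).foldl (fun acc kk =>
    let l_par := PySem.List.pyGetD l_parenthesis kk 0
    let r_par := PySem.List.pyGetD r_parenthesis kk 0
    let multiple := PySem.List.pyGetD n_parenthesis kk 0
    (PySem.List.pyRange 0 (PySem.List.len ind_elements) 1).foldl (fun acc2 ii =>
      let ind_elem := PySem.List.pyGetD ind_elements ii 0
      if ind_elem > l_par ∧ ind_elem < r_par then
        PySem.List.pySetD acc2 ii (multiple * PySem.List.pyGetD acc2 ii 0)
      else acc2) acc) nmb_elements

-- ===== PORT B =====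
-- _count_le of Source B: binary search; lo/hi/mid are nonnegative Python ints throughout,
-- so Nat arithmetic is exact here ((lo+hi)//2 = Nat division).
def countLeAux (xs : List Int) (v : Int) (lo hi : Nat) : Nat :=
  if _h : lo < hi then
    if PySem.List.pyGetD xs (((lo + hi) / 2 : Nat) : Int) 0 ≤ v then
      countLeAux xs v ((lo + hi) / 2 + 1) hi
    else
      countLeAux xs v lo ((lo + hi) / 2)
  else lo
termination_by hi - lo
decreasing_by all_goals omega

def countLe (xs : List Int) (v : Int) : Nat := countLeAux xs v 0 xs.length

-- _count_lt of Source B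
def countLtAux (xs : List Int) (v : Int) (lo hi : Nat) : Nat :=
  if _h : lo < hi then
    if PySem.List.pyGetD xs (((lo + hi) / 2 : Nat) : Int) 0 < v then
      countLtAux xs v ((lo + hi) / 2 + 1) hi
    else
      countLtAux xs v lo ((lo + hi) / 2)
  else lo
termination_by hi - lo
decreasing_by all_goals omega

def countLt (xs : List Int) (v : Int) : Nat := countLtAux xs v 0 xs.length

-- _solve of Source B: positions a..b-1 are nonnegative Python ints, so Nat is exact; the
-- 'b ≤ a + 1' guard is Python's 'b - a == 1' leaf test made total (only reached with a < b).
def solveB (a b : Nat) (ivs : List (Nat × Nat × Int)) (acc : Int) : List Int :=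
  let full := ivs.foldl (fun f iv => if iv.1 ≤ a ∧ b ≤ iv.2.1 then f * iv.2.2 else f) acc
  let rest := ivs.filter (fun iv => decide (¬ (iv.1 ≤ a ∧ b ≤ iv.2.1)))
  if _h : b ≤ a + 1 then [full]
  else
    let mid := (a + b) / 2
    solveB a mid (rest.filter (fun iv => decide (iv.1 < mid ∧ a < iv.2.1))) full ++
    solveB mid b (rest.filter (fun iv => decide (iv.1 < b ∧ mid < iv.2.1))) full
termination_by b - a
decreasing_by all_goals omega

def second_count_alt (l_parenthesis : List Int) (r_parenthesis : List Int) (n_parenthesis : List Int) (ind_elements : List Int) (nmb_elements : List Int) : List Int :=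
  let m : Int := PySem.List.len ind_elements
  let order := PySem.List.sorted (PySem.List.pyRange 0 m 1) (fun i => PySem.List.pyGetD ind_elements i 0) false
  let xs := order.map (fun i => PySem.List.pyGetD ind_elements i 0)
  let ivs := (PySem.List.pyRange 0 (PySem.List.len r_parenthesis) 1).foldl (fun acc k =>
    let lo := countLe xs (PySem.List.pyGetD l_parenthesis k 0)
    let hi := countLt xs (PySem.List.pyGetD r_parenthesis k 0)
    if lo < hi then acc ++ [(lo, hi, PySem.List.pyGetD n_parenthesis k 0)] else acc) []
  let fac_sorted := if 0 < ind_elements.length then solveB 0 ind_elements.length ivs 1 else []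
  let fac := (PySem.List.pyRange 0 m 1).foldl (fun f p =>
    PySem.List.pySetD f (PySem.List.pyGetD order p 0) (PySem.List.pyGetD fac_sorted p 0))
    (List.replicate ind_elements.length 1)
  ((PySem.List.pyRange 0 m 1).zip nmb_elements).map (fun ic => ic.2 * PySem.List.pyGetD fac ic.1 1)
    ++ nmb_elements.drop ind_elements.length

-- ===== PRECONDITION & SPEC =====
-- Pre_ excludes exactly the inputs on which A raises IndexError: a parenthesis index beyond
-- l_parenthesis/n_parenthesis, or some parenthesis condition selecting an element index at
-- or beyond the end of nmb_elements.  (The total Lean ports happen to agree on ALL inputs,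
-- so the proof below does not need this hypothesis; Pre_ delimits where the Pythons return.)
def Pre_second_count (l_parenthesis : List Int) (r_parenthesis : List Int) (n_parenthesis : List Int) (ind_elements : List Int) (nmb_elements : List Int) : Prop :=
  r_parenthesis.length ≤ l_parenthesis.length ∧ r_parenthesis.length ≤ n_parenthesis.length ∧
    ∀ kk < r_parenthesis.length, ∀ ii < ind_elements.length, nmb_elements.length ≤ ii →
      ¬ (l_parenthesis.getD kk 0 < ind_elements.getD ii 0 ∧ ind_elements.getD ii 0 < r_parenthesis.getD kk 0)
instance (l_parenthesis : List Int) (r_parenthesis : List Int) (n_parenthesis : List Int) (ind_elements : List Int) (nmb_elements : List Int) : Decidable (Pre_second_count l_parenthesis r_parenthesis n_parenthesis ind_elements nmb_elements) := by unfold Pre_second_count; infer_instance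

def pvWitness_second_count : List Int × List Int × List Int × List Int × List Int :=
  ([0], [4], [2], [1, 5], [3, 7])

def Spec_second_count (l_parenthesis : List Int) (r_parenthesis : List Int) (n_parenthesis : List Int) (ind_elements : List Int) (nmb_elements : List Int) (out : List Int) : Prop := out = second_count_alt l_parenthesis r_parenthesis n_parenthesis ind_elements nmb_elements
instance (l_parenthesis : List Int) (r_parenthesis : List Int) (n_parenthesis : List Int) (ind_elements : List Int) (nmb_elements : List Int) (out : List Int) : Decidable (Spec_second_count l_parenthesis r_parenthesis n_parenthesis ind_elements nmb_elements out) := by unfold Spec_second_count; infer_instance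

-- ===== CLAIM (what is proved, stated in full; the proofs are below) =====
def Claim_equal_second_count : Prop := ∀ (l_parenthesis : List Int) (r_parenthesis : List Int) (n_parenthesis : List Int) (ind_elements : List Int) (nmb_elements : List Int), Dom_second_count l_parenthesis r_parenthesis n_parenthesis ind_elements nmb_elements → Pre_second_count l_parenthesis r_parenthesis n_parenthesis ind_elements nmb_elements → Spec_second_count l_parenthesis r_parenthesis n_parenthesis ind_elements nmb_elements (second_count l_parenthesis r_parenthesis n_parenthesis ind_elements nmb_elements)

-- ===== LEMMAS AND PROOFS =====

-- the common reference value: the product of the multipliers of the parentheses enclosing x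
def encProd (x : Int) (l_parenthesis r_parenthesis n_parenthesis : List Int) (k : Int) : Int :=
  (PySem.List.pyRange 0 k 1).foldl (fun p kk =>
    if PySem.List.pyGetD l_parenthesis kk 0 < x ∧ x < PySem.List.pyGetD r_parenthesis kk 0 then
      p * PySem.List.pyGetD n_parenthesis kk 0
    else p) 1

-- the reference form both ports are reduced to
def refOut (l r n ind nmb : List Int) : List Int :=
  ((ind.zip nmb).map (fun xc => xc.2 * encProd xc.1 l r n (PySem.List.len r)))
    ++ nmb.drop ind.length

-- ---------- A-side: A's nested loops compute refOut (under Pre_) ----------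

def innerStep (lp rp m : Int) (ind : List Int) : List Int → Int → List Int :=
  fun acc2 ii =>
    let ind_elem := PySem.List.pyGetD ind ii 0
    if ind_elem > lp ∧ ind_elem < rp then
      PySem.List.pySetD acc2 ii (m * PySem.List.pyGetD acc2 ii 0)
    else acc2

def outerStep (l r n ind : List Int) : List Int → Int → List Int :=
  fun acc kk =>
    (PySem.List.pyRange 0 (PySem.List.len ind) 1).foldl
      (innerStep (PySem.List.pyGetD l kk 0) (PySem.List.pyGetD r kk 0) (PySem.List.pyGetD n kk 0) ind) acc

lemma foldl_innerStep_length (lp rp m : Int) (ind : List Int) :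
    ∀ (L : List Int) (acc : List Int), (L.foldl (innerStep lp rp m ind) acc).length = acc.length := by
  intro L
  induction L with
  | nil => intro acc; rfl
  | cons x t ih =>
    intro acc
    simp only [List.foldl_cons, ih]
    simp [innerStep]
    split <;> simp [PySem.List.length_pySetD]

lemma innerStep_fold_getD (lp rp m : Int) (ind : List Int) :
    ∀ (j : Nat) (acc : List Int) (i : Nat), j ≤ ind.length →
      ((PySem.List.pyRange 0 (j : Int) 1).foldl (innerStep lp rp m ind) acc).getD i 0 =
        if i < j ∧ ind.getD i 0 > lp ∧ ind.getD i 0 < rp then m * acc.getD i 0 else acc.getD i 0 := by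
  intro j
  induction j with
  | zero =>
    intro acc i _
    rw [PySem.List.pyRange_one_eq_nil (by omega)]
    simp
  | succ j ih =>
    intro acc i hj
    have hcast : ((j + 1 : Nat) : Int) = (j : Int) + 1 := by push_cast; ring
    rw [hcast, PySem.List.pyRange_one_succ_right (by positivity), List.foldl_append]
    simp only [List.foldl_cons, List.foldl_nil]
    rw [show (innerStep lp rp m ind) ((PySem.List.pyRange 0 (j:Int) 1).foldl (innerStep lp rp m ind) acc) (j:Int) =
        (let x := PySem.List.pyGetD ind (j:Int) 0;
         if x > lp ∧ x < rp then
           PySem.List.pySetD ((PySem.List.pyRange 0 (j:Int) 1).foldl (innerStep lp rp m ind) acc) (j:Int)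
             (m * PySem.List.pyGetD ((PySem.List.pyRange 0 (j:Int) 1).foldl (innerStep lp rp m ind) acc) (j:Int) 0)
         else ((PySem.List.pyRange 0 (j:Int) 1).foldl (innerStep lp rp m ind) acc)) from rfl]
    simp only [show PySem.List.pyGetD ind (j : Int) 0 = ind.getD j 0 from by simp [PySem.List.pyGetD_natCast]]
    set F := (PySem.List.pyRange 0 (j:Int) 1).foldl (innerStep lp rp m ind) acc with hF
    by_cases hc : ind.getD j 0 > lp ∧ ind.getD j 0 < rp
    · rw [if_pos hc]
      have hFj : PySem.List.pyGetD F (j:Int) 0 = acc.getD j 0 := by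
        rw [PySem.List.pyGetD_natCast]
        rw [ih acc j (by omega)]
        simp
      rw [PySem.List.pySetD_natCast, hFj]
      have hlenF : F.length = acc.length := foldl_innerStep_length lp rp m ind _ acc
      by_cases hij : i = j
      · subst hij
        rw [List.getD_eq_getElem?_getD, List.getElem?_set, if_pos rfl,
            if_pos (show i < i + 1 ∧ ind.getD i 0 > lp ∧ ind.getD i 0 < rp from ⟨by omega, hc⟩)]
        by_cases hlen : i < F.length
        · rw [if_pos hlen]; rfl
        · rw [if_neg hlen]
          have hnone : acc[i]? = none := List.getElem?_eq_none (by omega)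
          rw [List.getD_eq_getElem?_getD, hnone]
          simp
      · rw [List.getD_eq_getElem?_getD, List.getElem?_set, if_neg (by omega),
            ← List.getD_eq_getElem?_getD, ih acc i (by omega)]
        by_cases hi : i < j
        · simp [hi, show i < j + 1 from by omega]
        · simp [hi, show ¬ i < j + 1 from by omega]
    · rw [if_neg hc]
      rw [ih acc i (by omega)]
      by_cases hi : i < j
      · simp [hi, show i < j + 1 from by omega]
      · by_cases hij : i = j
        · subst hij
          rw [if_neg (fun h => hi h.1), if_neg (fun h => hc h.2)]
        · simp [hi, show ¬ i < j + 1 from by omega]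

lemma foldl_outerStep_length (l r n ind : List Int) :
    ∀ (L : List Int) (acc : List Int), (L.foldl (outerStep l r n ind) acc).length = acc.length := by
  intro L
  induction L with
  | nil => intro acc; rfl
  | cons x t ih =>
    intro acc
    simp only [List.foldl_cons, ih, outerStep]
    exact foldl_innerStep_length _ _ _ _ _ _

lemma encProd_succ (x : Int) (l r n : List Int) (k : Nat) :
    encProd x l r n ((k : Int) + 1) =
      if l.getD k 0 < x ∧ x < r.getD k 0 then encProd x l r n k * n.getD k 0 else encProd x l r n k := by
  unfold encProd
  rw [PySem.List.pyRange_one_succ_right (by positivity), List.foldl_append]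
  simp

lemma outerStep_fold_getD (l r n ind : List Int) :
    ∀ (k : Nat) (acc : List Int) (i : Nat),
      ((PySem.List.pyRange 0 (k : Int) 1).foldl (outerStep l r n ind) acc).getD i 0 =
        if i < ind.length then encProd (ind.getD i 0) l r n (k : Int) * acc.getD i 0 else acc.getD i 0 := by
  intro k
  induction k with
  | zero =>
    intro acc i
    rw [PySem.List.pyRange_one_eq_nil (by omega)]
    simp [encProd, PySem.List.pyRange_one_eq_nil]
  | succ k ih =>
    intro acc i
    have hcast : ((k + 1 : Nat) : Int) = (k : Int) + 1 := by push_cast; ring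
    rw [hcast, PySem.List.pyRange_one_succ_right (by positivity), List.foldl_append]
    simp only [List.foldl_cons, List.foldl_nil]
    rw [show (outerStep l r n ind) ((PySem.List.pyRange 0 (k:Int) 1).foldl (outerStep l r n ind) acc) (k:Int) =
        (PySem.List.pyRange 0 (PySem.List.len ind) 1).foldl
          (innerStep (PySem.List.pyGetD l (k:Int) 0) (PySem.List.pyGetD r (k:Int) 0) (PySem.List.pyGetD n (k:Int) 0) ind)
          ((PySem.List.pyRange 0 (k:Int) 1).foldl (outerStep l r n ind) acc) from rfl]
    rw [show PySem.List.len ind = ((ind.length : Nat) : Int) from by simp [PySem.List.len_eq]]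
    rw [innerStep_fold_getD _ _ _ ind ind.length _ i (le_refl _)]
    rw [encProd_succ]
    simp only [PySem.List.pyGetD_natCast]
    by_cases hi : i < ind.length
    · rw [ih acc i, if_pos hi, if_pos hi]
      by_cases hc : ind.getD i 0 > l.getD k 0 ∧ ind.getD i 0 < r.getD k 0
      · rw [if_pos ⟨hi, hc⟩, if_pos hc]
        ring
      · rw [if_neg (fun h => hc h.2), if_neg hc]
    · rw [if_neg (fun h => hi h.1), ih acc i, if_neg hi, if_neg hi]

lemma second_count_eq_refOut (l r n ind nmb : List Int) :
    second_count l r n ind nmb = refOut l r n ind nmb := by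
  show (PySem.List.pyRange 0 (PySem.List.len r) 1).foldl (outerStep l r n ind) nmb
      = refOut l r n ind nmb
  have hlenr : PySem.List.len r = ((r.length : Nat) : Int) := by simp [PySem.List.len_eq]
  have hL : ((PySem.List.pyRange 0 (PySem.List.len r) 1).foldl (outerStep l r n ind) nmb).length = nmb.length :=
    foldl_outerStep_length l r n ind _ nmb
  have hzip : (ind.zip nmb).length = min ind.length nmb.length := List.length_zip ..
  have hR : (refOut l r n ind nmb).length = nmb.length := by
    simp [refOut, hzip]
    omega
  apply List.ext_getElem (by omega)
  intro i hi1 hi2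
  have hgD : ((PySem.List.pyRange 0 (PySem.List.len r) 1).foldl (outerStep l r n ind) nmb)[i]
      = ((PySem.List.pyRange 0 (PySem.List.len r) 1).foldl (outerStep l r n ind) nmb).getD i 0 :=
    (List.getD_eq_getElem _ _ hi1).symm
  rw [hgD, hlenr, outerStep_fold_getD l r n ind r.length nmb i]
  have hinmb : i < nmb.length := by omega
  by_cases hii : i < ind.length
  · rw [if_pos hii]
    have hv : (refOut l r n ind nmb)[i] =
        nmb[i] * encProd ind[i] l r n (PySem.List.len r) := by
      simp only [refOut]
      rw [List.getElem_append_left (by simp [hzip]; omega)]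
      rw [List.getElem_map, List.getElem_zip]
    rw [hv, hlenr]
    rw [List.getD_eq_getElem ind 0 hii, List.getD_eq_getElem nmb 0 hinmb]
    ring
  · rw [if_neg hii]
    have hv : (refOut l r n ind nmb)[i] = nmb[i] := by
      simp only [refOut]
      rw [List.getElem_append_right (by simp [hzip]; omega)]
      simp [hzip]
      congr 1
      omega
    rw [hv, List.getD_eq_getElem nmb 0 hinmb]


-- ---------- B-side: generic fold/product lemmas ----------

lemma foldl_mul_acc {α : Type} (g : α → Int) (C : α → Prop) [DecidablePred C] :
    ∀ (l : List α) (acc : Int),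
      l.foldl (fun f x => if C x then f * g x else f) acc
        = acc * (l.map (fun x => if C x then g x else 1)).prod := by
  intro l
  induction l with
  | nil => intro acc; simp
  | cons x t ih =>
    intro acc
    simp only [List.foldl_cons, List.map_cons, List.prod_cons, ih]
    by_cases h : C x
    · simp [h]; ring
    · simp [h]

lemma prod_map_filter_of_one {α : Type} (W : α → Int) (Q : α → Bool) :
    ∀ (l : List α), (∀ x ∈ l, Q x = false → W x = 1) →
      ((l.filter Q).map W).prod = (l.map W).prod := by
  intro l
  induction l with
  | nil => intro _; simp
  | cons x t ih =>
    intro h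
    by_cases hq : Q x
    · simp [hq, ih (fun y hy => h y (List.mem_cons_of_mem _ hy))]
    · have hx : W x = 1 := h x (List.mem_cons_self) (by simpa using hq)
      simp [hq, hx, ih (fun y hy => h y (List.mem_cons_of_mem _ hy))]

lemma prod_map_split {α : Type} (W : α → Int) (Q : α → Bool) :
    ∀ (l : List α),
      (l.map W).prod = ((l.filter Q).map W).prod * ((l.filter (fun x => !(Q x))).map W).prod := by
  intro l
  induction l with
  | nil => simp
  | cons x t ih =>
    by_cases hq : Q x <;> simp [hq, ih] <;> ring


-- ---------- B-side: binary search ----------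

lemma countLeAux_spec (xs : List Int) (v : Int)
    (hmono : ∀ i j : Nat, i ≤ j → j < xs.length → xs.getD j 0 ≤ v → xs.getD i 0 ≤ v) :
    ∀ (fuel lo hi : Nat), hi - lo ≤ fuel → lo ≤ hi → hi ≤ xs.length →
      (∀ i, i < lo → xs.getD i 0 ≤ v) → (∀ i, hi ≤ i → i < xs.length → ¬ xs.getD i 0 ≤ v) →
      lo ≤ countLeAux xs v lo hi ∧ countLeAux xs v lo hi ≤ hi ∧
        (∀ i, i < xs.length → (i < countLeAux xs v lo hi ↔ xs.getD i 0 ≤ v)) := by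
  intro fuel
  induction fuel with
  | zero =>
    intro lo hi hfuel hle hhi hlow hhigh
    have heq : lo = hi := by omega
    subst heq
    rw [countLeAux, dif_neg (by omega)]
    refine ⟨le_refl _, le_refl _, ?_⟩
    intro i hi'
    constructor
    · exact fun h => hlow i h
    · intro h
      by_contra hge
      exact hhigh i (by omega) hi' h
  | succ fuel ih =>
    intro lo hi hfuel hle hhi hlow hhigh
    by_cases h : lo < hi
    · rw [countLeAux, dif_pos h]
      have hmid1 : lo ≤ (lo + hi) / 2 := by omega
      have hmid2 : (lo + hi) / 2 < hi := by omega
      have hmidlen : (lo + hi) / 2 < xs.length := by omega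
      have hget : PySem.List.pyGetD xs (((lo + hi) / 2 : Nat) : Int) 0 = xs.getD ((lo + hi) / 2) 0 := by
        rw [PySem.List.pyGetD_natCast]
      by_cases hc : PySem.List.pyGetD xs (((lo + hi) / 2 : Nat) : Int) 0 ≤ v
      · rw [if_pos hc]
        rw [hget] at hc
        have := ih ((lo + hi) / 2 + 1) hi (by omega) (by omega) hhi
          (fun i hilt => hmono i ((lo + hi) / 2) (by omega) hmidlen hc) hhigh
        exact ⟨by omega, this.2.1, this.2.2⟩
      · rw [if_neg hc]
        rw [hget] at hc
        have := ih lo ((lo + hi) / 2) (by omega) (by omega) (by omega) hlow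
          (fun i hgei hilt hle' => hc (hmono ((lo + hi) / 2) i (by omega) hilt hle'))
        exact ⟨this.1, by omega, this.2.2⟩
    · rw [countLeAux, dif_neg h]
      have heq : lo = hi := by omega
      subst heq
      refine ⟨le_refl _, le_refl _, ?_⟩
      intro i hi'
      exact ⟨fun hlt => hlow i hlt, fun hv => by
        by_contra hge
        exact hhigh i (by omega) hi' hv⟩

lemma countLe_spec (xs : List Int) (v : Int)
    (hmono : ∀ i j : Nat, i ≤ j → j < xs.length → xs.getD j 0 ≤ v → xs.getD i 0 ≤ v) :
    countLe xs v ≤ xs.length ∧ ∀ i, i < xs.length → (i < countLe xs v ↔ xs.getD i 0 ≤ v) := by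
  have := countLeAux_spec xs v hmono xs.length 0 xs.length (by omega) (by omega) (le_refl _)
    (fun i hi => absurd hi (by omega)) (fun i h1 h2 => absurd h1 (by omega))
  exact ⟨this.2.1, this.2.2⟩


lemma countLtAux_spec (xs : List Int) (v : Int)
    (hmono : ∀ i j : Nat, i ≤ j → j < xs.length → xs.getD j 0 < v → xs.getD i 0 < v) :
    ∀ (fuel lo hi : Nat), hi - lo ≤ fuel → lo ≤ hi → hi ≤ xs.length →
      (∀ i, i < lo → xs.getD i 0 < v) → (∀ i, hi ≤ i → i < xs.length → ¬ xs.getD i 0 < v) →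
      lo ≤ countLtAux xs v lo hi ∧ countLtAux xs v lo hi ≤ hi ∧
        (∀ i, i < xs.length → (i < countLtAux xs v lo hi ↔ xs.getD i 0 < v)) := by
  intro fuel
  induction fuel with
  | zero =>
    intro lo hi hfuel hle hhi hlow hhigh
    have heq : lo = hi := by omega
    subst heq
    rw [countLtAux, dif_neg (by omega)]
    refine ⟨le_refl _, le_refl _, ?_⟩
    intro i hi'
    constructor
    · exact fun h => hlow i h
    · intro h
      by_contra hge
      exact hhigh i (by omega) hi' h
  | succ fuel ih =>
    intro lo hi hfuel hle hhi hlow hhigh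
    by_cases h : lo < hi
    · rw [countLtAux, dif_pos h]
      have hmid1 : lo ≤ (lo + hi) / 2 := by omega
      have hmid2 : (lo + hi) / 2 < hi := by omega
      have hmidlen : (lo + hi) / 2 < xs.length := by omega
      have hget : PySem.List.pyGetD xs (((lo + hi) / 2 : Nat) : Int) 0 = xs.getD ((lo + hi) / 2) 0 := by
        rw [PySem.List.pyGetD_natCast]
      by_cases hc : PySem.List.pyGetD xs (((lo + hi) / 2 : Nat) : Int) 0 < v
      · rw [if_pos hc]
        rw [hget] at hc
        have := ih ((lo + hi) / 2 + 1) hi (by omega) (by omega) hhi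
          (fun i hilt => hmono i ((lo + hi) / 2) (by omega) hmidlen hc) hhigh
        exact ⟨by omega, this.2.1, this.2.2⟩
      · rw [if_neg hc]
        rw [hget] at hc
        have := ih lo ((lo + hi) / 2) (by omega) (by omega) (by omega) hlow
          (fun i hgei hilt hlt' => hc (hmono ((lo + hi) / 2) i (by omega) hilt hlt'))
        exact ⟨this.1, by omega, this.2.2⟩
    · rw [countLtAux, dif_neg h]
      have heq : lo = hi := by omega
      subst heq
      refine ⟨le_refl _, le_refl _, ?_⟩
      intro i hi'
      exact ⟨fun hlt => hlow i hlt, fun hv => by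
        by_contra hge
        exact hhigh i (by omega) hi' hv⟩

lemma countLt_spec (xs : List Int) (v : Int)
    (hmono : ∀ i j : Nat, i ≤ j → j < xs.length → xs.getD j 0 < v → xs.getD i 0 < v) :
    countLt xs v ≤ xs.length ∧ ∀ i, i < xs.length → (i < countLt xs v ↔ xs.getD i 0 < v) := by
  have := countLtAux_spec xs v hmono xs.length 0 xs.length (by omega) (by omega) (le_refl _)
    (fun i hi => absurd hi (by omega)) (fun i h1 h2 => absurd h1 (by omega))
  exact ⟨this.2.1, this.2.2⟩


-- ---------- B-side: the divide and conquer pass ----------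

-- the product of the multipliers of the ivs whose range [lo,hi) contains position p
def prodAt (ivs : List (Nat × Nat × Int)) (p : Nat) : Int :=
  (ivs.map (fun iv => if iv.1 ≤ p ∧ p < iv.2.1 then iv.2.2 else 1)).prod

lemma prodAt_filter (ivs : List (Nat × Nat × Int)) (Q : (Nat × Nat × Int) → Bool) (p : Nat)
    (h : ∀ iv ∈ ivs, Q iv = false → ¬ (iv.1 ≤ p ∧ p < iv.2.1)) :
    prodAt (ivs.filter Q) p = prodAt ivs p := by
  unfold prodAt
  exact prod_map_filter_of_one _ Q ivs (fun iv hiv hq => if_neg (h iv hiv hq))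

lemma solveB_spec :
    ∀ (fuel a b : Nat) (ivs : List (Nat × Nat × Int)) (acc : Int), b - a ≤ fuel → a < b →
      (solveB a b ivs acc).length = b - a ∧
        ∀ q, q < b - a → (solveB a b ivs acc).getD q 0 = acc * prodAt ivs (a + q) := by
  intro fuel
  induction fuel with
  | zero => intro a b ivs acc hf hab; omega
  | succ fuel ih =>
    intro a b ivs acc hf hab
    by_cases hleaf : b ≤ a + 1
    · have hb : b = a + 1 := by omega
      subst hb
      rw [solveB, dif_pos (by omega)]
      refine ⟨by simp, ?_⟩
      intro q hq
      have hq0 : q = 0 := by omega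
      subst hq0
      simp only [List.getD_cons_zero, Nat.add_zero]
      rw [foldl_mul_acc (fun iv : Nat × Nat × Int => iv.2.2) (fun iv => iv.1 ≤ a ∧ a + 1 ≤ iv.2.1)]
      unfold prodAt
      congr 1
    · rw [solveB, dif_neg hleaf]
      -- abbreviations
      set Q : (Nat × Nat × Int) → Prop := fun iv => iv.1 ≤ a ∧ b ≤ iv.2.1 with hQ
      set full := ivs.foldl (fun f iv => if iv.1 ≤ a ∧ b ≤ iv.2.1 then f * iv.2.2 else f) acc with hfull
      set rest := ivs.filter (fun iv => decide (¬ (iv.1 ≤ a ∧ b ≤ iv.2.1))) with hrest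
      set mid := (a + b) / 2 with hmid
      have hamid : a < mid := by omega
      have hmidb : mid < b := by omega
      have ihL := ih a mid (rest.filter (fun iv => decide (iv.1 < mid ∧ a < iv.2.1))) full (by omega) hamid
      have ihR := ih mid b (rest.filter (fun iv => decide (iv.1 < b ∧ mid < iv.2.1))) full (by omega) hmidb
      constructor
      · rw [List.length_append, ihL.1, ihR.1]; omega
      · intro q hq
        -- the key decomposition: acc * prodAt ivs p = full * prodAt rest p  for p ∈ [a,b)
        have hkey : ∀ p, a ≤ p → p < b → acc * prodAt ivs p = full * prodAt rest p := by
          intro p hpa hpb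
          rw [hfull, foldl_mul_acc (fun iv : Nat × Nat × Int => iv.2.2) (fun iv => iv.1 ≤ a ∧ b ≤ iv.2.1)]
          unfold prodAt
          rw [prod_map_split (fun iv : Nat × Nat × Int => if iv.1 ≤ p ∧ p < iv.2.1 then iv.2.2 else 1)
            (fun iv => decide (iv.1 ≤ a ∧ b ≤ iv.2.1)) ivs]
          have h1 : ((ivs.filter (fun iv => decide (iv.1 ≤ a ∧ b ≤ iv.2.1))).map
              (fun iv : Nat × Nat × Int => if iv.1 ≤ p ∧ p < iv.2.1 then iv.2.2 else 1)).prod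
              = ((ivs.filter (fun iv => decide (iv.1 ≤ a ∧ b ≤ iv.2.1))).map
                  (fun iv : Nat × Nat × Int => iv.2.2)).prod := by
            congr 1
            apply List.map_congr_left
            intro iv hiv
            have hc := (List.mem_filter.mp hiv).2
            have hc' : iv.1 ≤ a ∧ b ≤ iv.2.1 := by simpa using hc
            exact if_pos ⟨by omega, by omega⟩
          have h2 : (ivs.filter (fun iv => !(decide (iv.1 ≤ a ∧ b ≤ iv.2.1)))) = rest := by
            rw [hrest]
            congr 1
            funext iv
            exact decide_not.symm
          have h3 : ((ivs.map (fun iv : Nat × Nat × Int => if iv.1 ≤ a ∧ b ≤ iv.2.1 then iv.2.2 else 1))).prod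
              = ((ivs.filter (fun iv => decide (iv.1 ≤ a ∧ b ≤ iv.2.1))).map
                  (fun iv : Nat × Nat × Int => iv.2.2)).prod := by
            rw [← prod_map_filter_of_one (fun iv : Nat × Nat × Int => if iv.1 ≤ a ∧ b ≤ iv.2.1 then iv.2.2 else 1)
              (fun iv => decide (iv.1 ≤ a ∧ b ≤ iv.2.1)) ivs
              (fun iv _ hq' => if_neg (by simpa using hq'))]
            congr 1
            apply List.map_congr_left
            intro iv hiv
            exact if_pos (by simpa using (List.mem_filter.mp hiv).2)
          rw [h1, h2, h3]
          ring
        by_cases hql : q < mid - a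
        · rw [List.getD_append _ _ _ _ (by rw [ihL.1]; omega)]
          rw [ihL.2 q (by omega)]
          rw [prodAt_filter _ _ _ (fun iv hiv hq' => by
            have := of_decide_eq_false hq'
            omega)]
          exact (hkey (a + q) (by omega) (by omega)).symm
        · have hq2 : q - (mid - a) < b - mid := by omega
          rw [List.getD_append_right _ _ _ _ (by rw [ihL.1]; omega)]
          rw [ihL.1]
          rw [ihR.2 (q - (mid - a)) hq2]
          rw [prodAt_filter _ _ _ (fun iv hiv hq' => by
            have := of_decide_eq_false hq'
            omega)]
          have : mid + (q - (mid - a)) = a + q := by omega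
          rw [this]
          exact (hkey (a + q) (by omega) (by omega)).symm


-- ---------- B-side: the whole of second_count_alt computes refOut ----------

-- proof-side names for the let-chain of second_count_alt (definitionally equal to it)
def ordOf (ind : List Int) : List Int :=
  PySem.List.sorted (PySem.List.pyRange 0 (PySem.List.len ind) 1) (fun i => PySem.List.pyGetD ind i 0) false

def xsOf (ind : List Int) : List Int :=
  (ordOf ind).map (fun i => PySem.List.pyGetD ind i 0)

def ivsOf (l r n ind : List Int) : List (Nat × Nat × Int) :=
  (PySem.List.pyRange 0 (PySem.List.len r) 1).foldl (fun acc k =>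
    if countLe (xsOf ind) (PySem.List.pyGetD l k 0) < countLt (xsOf ind) (PySem.List.pyGetD r k 0) then
      acc ++ [(countLe (xsOf ind) (PySem.List.pyGetD l k 0), countLt (xsOf ind) (PySem.List.pyGetD r k 0),
        PySem.List.pyGetD n k 0)]
    else acc) []

def fsOf (l r n ind : List Int) : List Int :=
  if 0 < ind.length then solveB 0 ind.length (ivsOf l r n ind) 1 else []

def facOf (l r n ind : List Int) : List Int :=
  (PySem.List.pyRange 0 (PySem.List.len ind) 1).foldl (fun f p =>
    PySem.List.pySetD f (PySem.List.pyGetD (ordOf ind) p 0) (PySem.List.pyGetD (fsOf l r n ind) p 0))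
    (List.replicate ind.length 1)

lemma alt_body (l r n ind nmb : List Int) :
    second_count_alt l r n ind nmb =
      ((PySem.List.pyRange 0 (PySem.List.len ind) 1).zip nmb).map
        (fun ic => ic.2 * PySem.List.pyGetD (facOf l r n ind) ic.1 1)
      ++ nmb.drop ind.length := rfl

lemma len_ord (ind : List Int) : (ordOf ind).length = ind.length := by
  simp [ordOf, PySem.List.length_sorted, PySem.List.length_pyRange_one]

lemma len_xs (ind : List Int) : (xsOf ind).length = ind.length := by
  simp [xsOf, len_ord]

lemma xs_getD (ind : List Int) (p : Nat) (hp : p < ind.length) :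
    (xsOf ind).getD p 0 = PySem.List.pyGetD ind ((ordOf ind).getD p 0) 0 := by
  have hp' : p < (ordOf ind).length := by rw [len_ord]; exact hp
  have hpx : p < (xsOf ind).length := by rw [len_xs]; exact hp
  rw [List.getD_eq_getElem _ _ hpx, List.getD_eq_getElem _ _ hp']
  simp [xsOf]

lemma xs_mono (ind : List Int) (p q : Nat) (hpq : p ≤ q) (hq : q < ind.length) :
    (xsOf ind).getD p 0 ≤ (xsOf ind).getD q 0 := by
  have hq' : q < (xsOf ind).length := by rw [len_xs]; exact hq
  have hp' : p < (xsOf ind).length := by omega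
  rw [List.getD_eq_getElem _ _ hp', List.getD_eq_getElem _ _ hq']
  simp only [xsOf, List.getElem_map]
  exact PySem.List.key_sorted_getElem_mono (PySem.List.pyRange 0 (PySem.List.len ind) 1)
    (fun i => PySem.List.pyGetD ind i 0) hpq (by simpa [xsOf, ordOf] using hq')

lemma ord_mem_bounds (ind : List Int) (x : Int) (hx : x ∈ ordOf ind) :
    0 ≤ x ∧ x < (ind.length : Int) := by
  have := (PySem.List.mem_sorted _ _ _ _).mp hx
  have h2 := PySem.List.mem_pyRange_one.mp this
  simpa [PySem.List.len_eq] using h2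

lemma ord_nodup (ind : List Int) : (ordOf ind).Nodup := by
  exact (PySem.List.sorted_perm _ _ _).nodup_iff.mpr (PySem.List.nodup_pyRange_one _ _)

lemma xs_mono_le (ind : List Int) (v : Int) :
    ∀ i j : Nat, i ≤ j → j < (xsOf ind).length → (xsOf ind).getD j 0 ≤ v → (xsOf ind).getD i 0 ≤ v := by
  intro i j hij hj hv
  exact le_trans (xs_mono ind i j hij (by rwa [len_xs] at hj)) hv

lemma xs_mono_lt (ind : List Int) (v : Int) :
    ∀ i j : Nat, i ≤ j → j < (xsOf ind).length → (xsOf ind).getD j 0 < v → (xsOf ind).getD i 0 < v := by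
  intro i j hij hj hv
  exact lt_of_le_of_lt (xs_mono ind i j hij (by rwa [len_xs] at hj)) hv

lemma ivs_eq (l r n ind : List Int) :
    ivsOf l r n ind =
      ((PySem.List.pyRange 0 (PySem.List.len r) 1).filter
          (fun k => decide (countLe (xsOf ind) (PySem.List.pyGetD l k 0) < countLt (xsOf ind) (PySem.List.pyGetD r k 0)))).map
        (fun k => (countLe (xsOf ind) (PySem.List.pyGetD l k 0), countLt (xsOf ind) (PySem.List.pyGetD r k 0),
          PySem.List.pyGetD n k 0)) := by
  unfold ivsOf
  have hfn : (fun (acc : List (Nat × Nat × Int)) (k : Int) =>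
      if countLe (xsOf ind) (PySem.List.pyGetD l k 0) < countLt (xsOf ind) (PySem.List.pyGetD r k 0) then
        acc ++ [(countLe (xsOf ind) (PySem.List.pyGetD l k 0), countLt (xsOf ind) (PySem.List.pyGetD r k 0),
          PySem.List.pyGetD n k 0)]
      else acc)
      = (fun (acc : List (Nat × Nat × Int)) (k : Int) =>
        if (fun k => decide (countLe (xsOf ind) (PySem.List.pyGetD l k 0) < countLt (xsOf ind) (PySem.List.pyGetD r k 0))) k = true then
          acc ++ [(fun k => (countLe (xsOf ind) (PySem.List.pyGetD l k 0), countLt (xsOf ind) (PySem.List.pyGetD r k 0),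
            PySem.List.pyGetD n k 0)) k]
        else acc) := by
    funext acc k
    simp
  rw [hfn, PySem.List.foldl_append_if]
  simp

lemma prodAt_ivs (l r n ind : List Int) (p : Nat) (hp : p < ind.length) :
    prodAt (ivsOf l r n ind) p = encProd ((xsOf ind).getD p 0) l r n (PySem.List.len r) := by
  have hpx : p < (xsOf ind).length := by rw [len_xs]; exact hp
  have hLe := fun v => countLe_spec (xsOf ind) v (xs_mono_le ind v)
  have hLt := fun v => countLt_spec (xsOf ind) v (xs_mono_lt ind v)
  rw [ivs_eq]
  unfold prodAt
  rw [List.map_map]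
  rw [prod_map_filter_of_one _ _ _ (by
    intro k _ hkf
    have hk := of_decide_eq_false hkf
    simp only [Function.comp]
    rw [if_neg]
    intro hc
    have h1 := hc.1
    have h2 := hc.2
    omega)]
  unfold encProd
  rw [foldl_mul_acc (fun kk => PySem.List.pyGetD n kk 0)
    (fun kk => PySem.List.pyGetD l kk 0 < (xsOf ind).getD p 0 ∧ (xsOf ind).getD p 0 < PySem.List.pyGetD r kk 0)]
  rw [one_mul]
  congr 1
  apply List.map_congr_left
  intro k _
  simp only [Function.comp]
  have e1 := ((hLe (PySem.List.pyGetD l k 0)).2 p hpx)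
  have e2 := ((hLt (PySem.List.pyGetD r k 0)).2 p hpx)
  by_cases hc : PySem.List.pyGetD l k 0 < (xsOf ind).getD p 0 ∧ (xsOf ind).getD p 0 < PySem.List.pyGetD r k 0
  · rw [if_pos ?_, if_pos hc]
    constructor
    · by_contra hlt
      have : p < countLe (xsOf ind) (PySem.List.pyGetD l k 0) := by omega
      have := e1.mp this
      omega
    · exact e2.mpr hc.2
  · rw [if_neg ?_, if_neg hc]
    intro hcc
    apply hc
    constructor
    · have : ¬ p < countLe (xsOf ind) (PySem.List.pyGetD l k 0) := by omega
      have := fun h => this (e1.mpr h)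
      omega
    · exact e2.mp hcc.2

lemma foldl_set_getD_ne (idx : Nat → Nat) (val : Nat → Int) :
    ∀ (ps : List Nat) (f0 : List Int) (j : Nat), (∀ p ∈ ps, idx p ≠ j) →
      (ps.foldl (fun f p => f.set (idx p) (val p)) f0).getD j 1 = f0.getD j 1 := by
  intro ps
  induction ps with
  | nil => intro f0 j _; rfl
  | cons q t ih =>
    intro f0 j hne
    simp only [List.foldl_cons]
    rw [ih _ j (fun p hp => hne p (List.mem_cons_of_mem _ hp))]
    rw [List.getD_eq_getElem?_getD, List.getD_eq_getElem?_getD,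
      List.getElem?_set_ne (hne q List.mem_cons_self)]

lemma foldl_set_getD (idx : Nat → Nat) (val : Nat → Int) :
    ∀ (ps : List Nat) (f0 : List Int), ps.Pairwise (fun p q => idx p ≠ idx q) →
      ∀ p ∈ ps, idx p < f0.length →
        (ps.foldl (fun f p => f.set (idx p) (val p)) f0).getD (idx p) 1 = val p := by
  intro ps
  induction ps with
  | nil => intro f0 _ p hp; exact absurd hp (by simp)
  | cons q t ih =>
    intro f0 hpw p hp hlen
    have hpw' := List.pairwise_cons.mp hpw
    simp only [List.foldl_cons]
    rcases List.mem_cons.mp hp with hq | ht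
    · subst hq
      rw [foldl_set_getD_ne idx val t _ _ (fun p' hp' => (hpw'.1 p' hp').symm)]
      rw [List.getD_eq_getElem?_getD, List.getElem?_set_self (by omega)]
      rfl
    · exact ih _ hpw'.2 p ht (by simpa [List.length_set] using hlen)

lemma fac_getD (l r n ind : List Int) (i : Nat) (hi : i < ind.length) :
    (facOf l r n ind).getD i 1 = encProd (ind.getD i 0) l r n (PySem.List.len r) := by
  have hlenind : PySem.List.len ind = ((ind.length : Nat) : Int) := by simp [PySem.List.len_eq]
  -- the position of i in the sort order
  have hmem : (i : Int) ∈ ordOf ind := by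
    rw [ordOf, PySem.List.mem_sorted, PySem.List.mem_pyRange_one]
    constructor
    · positivity
    · rw [hlenind]; exact_mod_cast hi
  obtain ⟨p, hplt, hpi⟩ := List.getElem_of_mem hmem
  have hpm : p < ind.length := by rwa [len_ord] at hplt
  have hordp : (ordOf ind).getD p 0 = (i : Int) := by
    rw [List.getD_eq_getElem _ _ hplt, hpi]
  -- rewrite the fold over pyRange as a fold over List.range
  have hfold : facOf l r n ind =
      (List.range ind.length).foldl
        (fun f p => f.set ((ordOf ind).getD p 0).toNat ((fsOf l r n ind).getD p 0))
        (List.replicate ind.length 1) := by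
    unfold facOf
    rw [hlenind, PySem.List.pyRange_zero_nat, List.foldl_map]
    apply PySem.List.foldl_congr_mem
    intro acc x hx
    have hxm : x < ind.length := List.mem_range.mp hx
    have hb := ord_mem_bounds ind ((ordOf ind).getD x 0) (by
      rw [List.getD_eq_getElem _ _ (by rw [len_ord]; exact hxm)]
      exact List.getElem_mem _)
    rw [PySem.List.pyGetD_natCast, PySem.List.pyGetD_natCast,
      PySem.List.pySetD_of_nonneg _ _ hb.1]
  rw [hfold]
  have hpw : (List.range ind.length).Pairwise
      (fun p q => ((ordOf ind).getD p 0).toNat ≠ ((ordOf ind).getD q 0).toNat) := by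
    rw [List.pairwise_iff_getElem]
    intro a b ha hb hab
    simp only [List.getElem_range]
    have ha' : a < (ordOf ind).length := by rw [len_ord]; simpa using ha
    have hb' : b < (ordOf ind).length := by rw [len_ord]; simpa using hb
    rw [List.getD_eq_getElem _ _ ha', List.getD_eq_getElem _ _ hb']
    have hna := (ord_mem_bounds ind _ (List.getElem_mem ha')).1
    have hnb := (ord_mem_bounds ind _ (List.getElem_mem hb')).1
    intro hEq
    have : (ordOf ind)[a] = (ordOf ind)[b] := by omega
    have := ((ord_nodup ind).getElem_inj_iff).mp this
    omega
  have := foldl_set_getD (fun p => ((ordOf ind).getD p 0).toNat) (fun p => (fsOf l r n ind).getD p 0)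
    (List.range ind.length) (List.replicate ind.length 1) hpw p (List.mem_range.mpr hpm)
    (by simp only [List.length_replicate]; rw [hordp]; simpa using hi)
  simp only [] at this
  rw [hordp] at this
  simp only [Int.toNat_natCast] at this
  rw [this]
  -- the value written at position p
  have hfs : (fsOf l r n ind).getD p 0 = prodAt (ivsOf l r n ind) p := by
    unfold fsOf
    rw [if_pos (by omega)]
    have := solveB_spec ind.length 0 ind.length (ivsOf l r n ind) 1 (by omega) (by omega)
    rw [this.2 p (by omega)]
    simp
  rw [hfs, prodAt_ivs l r n ind p hpm, xs_getD ind p hpm, hordp, PySem.List.pyGetD_natCast]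

lemma alt_eq_refOut (l r n ind nmb : List Int) :
    second_count_alt l r n ind nmb = refOut l r n ind nmb := by
  rw [alt_body]
  unfold refOut
  congr 1
  have hlenind : PySem.List.len ind = ((ind.length : Nat) : Int) := by simp [PySem.List.len_eq]
  have hlenrng : (PySem.List.pyRange 0 (PySem.List.len ind) 1).length = ind.length := by
    rw [PySem.List.length_pyRange_one]
    omega
  apply List.ext_getElem
  · simp [List.length_zip]
  · intro q h1 h2
    simp only [List.length_map, List.length_zip, hlenrng] at h1
    have hq : q < ind.length := by omega
    have hqn : q < nmb.length := by omega
    rw [List.getElem_map, List.getElem_map, List.getElem_zip, List.getElem_zip]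
    simp only []
    have hrng : (PySem.List.pyRange 0 (PySem.List.len ind) 1)[q]'(by omega) = (q : Int) := by
      rw [PySem.List.getElem_pyRange_one]
      omega
    rw [hrng, PySem.List.pyGetD_natCast]
    rw [fac_getD l r n ind q hq]
    rw [List.getD_eq_getElem _ _ hq]

-- ===== VERDICT (by name: the statement is the Claim_ definition above) =====
theorem second_count_spec : Claim_equal_second_count := by
  intro l r n ind nmb _ _
  show second_count l r n ind nmb = second_count_alt l r n ind nmb
  rw [second_count_eq_refOut, alt_eq_refOut]
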